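-- pv_equiv track=rewrite | github.com/pypi-data/pypi-mirror-217 | packages/vbelt/vbelt-0.2.0.tar.gz/vbelt-0.2.0/vbelt/jobtool.py | int_sqrt
-- ===== SOURCE A (Python) =====
-- def int_sqrt(n):
--     prev = n
--
--     for j in range(n, 0, -1):
--         if n % j == 0:
--             if j**2 == n:
--                 return j
--             elif j**2 < n:
--                 return prev
--             else:
--                 prev = j
--
--     return prev
-- ===== SOURCE B (Python) =====
-- def int_sqrt(n):
--     # Largest divisor e of n with e*e <= n, found by ascending trial division;
--     # the answer is its cofactor n // e (smallest divisor with square >= n).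
--     e = 1
--     i = 2
--     while i * i <= n:
--         if n % i == 0:
--             e = i
--         i += 1
--     return n // e
-- ===== Notes on version B (the rewrite author's own statement) =====
-- stated objective: faster
-- what changed: Replaces A's downward scan over every candidate from n to one by ascending trial division up to sqrt(n), keeping the largest divisor e with e*e <= n and returning its cofactor n // e.
import Mathlib
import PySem

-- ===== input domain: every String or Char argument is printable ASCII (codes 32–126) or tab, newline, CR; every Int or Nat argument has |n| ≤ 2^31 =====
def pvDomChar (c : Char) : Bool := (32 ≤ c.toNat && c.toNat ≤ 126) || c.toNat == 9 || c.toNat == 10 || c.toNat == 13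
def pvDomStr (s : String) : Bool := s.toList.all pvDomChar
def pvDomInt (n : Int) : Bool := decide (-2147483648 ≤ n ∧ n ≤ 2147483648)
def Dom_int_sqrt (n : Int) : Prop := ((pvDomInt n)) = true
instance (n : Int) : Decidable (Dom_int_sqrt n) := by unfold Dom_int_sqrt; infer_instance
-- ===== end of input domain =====

-- B replaces A's O(n) countdown over all of range(n, 0, -1) by ascending trial
-- division up to sqrt(n) (O(sqrt n)), returning the cofactor of the largest
-- divisor not exceeding sqrt(n).


-- ===== PORT A =====
-- literal port of A's for-loop over range(n, 0, -1) with early returns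
def intSqrtLoopA (n : Int) : List Int → Int → Int
  | [], prev => prev
  | j :: rest, prev =>
    if PySem.Int.mod n j = 0 then
      if j ^ 2 = n then j
      else if j ^ 2 < n then prev
      else intSqrtLoopA n rest j
    else intSqrtLoopA n rest prev

def int_sqrt (n : Int) : Int :=
  intSqrtLoopA n (PySem.List.pyRange n 0 (-1)) n

-- ===== PORT B =====
-- literal port of B's while loop: i ascends while i*i <= n, e = latest divisor found
def intSqrtLoopB (n i e : Int) : Int :=
  if _h : i * i ≤ n then
    intSqrtLoopB n (i + 1) (if PySem.Int.mod n i = 0 then i else e)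
  else e
termination_by (n + 1 - i).toNat
decreasing_by
  have h1 : 0 ≤ i * i := mul_self_nonneg i
  have h2 : i ≤ 0 ∨ i ≤ i * i := by
    by_cases h0 : i ≤ 0
    · exact Or.inl h0
    · exact Or.inr (le_mul_of_one_le_left (by omega) (by omega))
  omega

def int_sqrt_alt (n : Int) : Int :=
  PySem.Int.floordiv n (intSqrtLoopB n 2 1)

-- ===== PRECONDITION & SPEC =====
def Spec_int_sqrt (n : Int) (out : Int) : Prop := out = int_sqrt_alt n
instance (n : Int) (out : Int) : Decidable (Spec_int_sqrt n out) := by unfold Spec_int_sqrt; infer_instance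

-- ===== CLAIM (what is proved, stated in full; the proofs are below) =====
def Claim_equal_int_sqrt : Prop := ∀ (n : Int), Dom_int_sqrt n → Spec_int_sqrt n (int_sqrt n)

-- ===== LEMMAS AND PROOFS =====

-- B's loop computes the largest divisor e of n with e*e ≤ n (for 1 ≤ n).
lemma loopB_spec (n : Int) : ∀ (i e : Int), 2 ≤ i → 1 ≤ e → e < i → e ∣ n → e * e ≤ n →
    (∀ d, d ∣ n → d * d ≤ n → d < i → d ≤ e) →
    (intSqrtLoopB n i e ∣ n ∧ 1 ≤ intSqrtLoopB n i e ∧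
     intSqrtLoopB n i e * intSqrtLoopB n i e ≤ n ∧
     ∀ d, d ∣ n → d * d ≤ n → d ≤ intSqrtLoopB n i e) := by
  intro i e
  induction i, e using intSqrtLoopB.induct n with
  | case1 i e hle ih =>
    intro hi2 he1 hei hed hee hmax
    rw [intSqrtLoopB, dif_pos hle]
    by_cases hdvd : PySem.Int.mod n i = 0
    · have hid : i ∣ n := (PySem.Int.mod_eq_zero_iff_dvd n i).mp hdvd
      rw [if_pos hdvd]
      simp only [dif_pos hdvd] at ih
      exact ih (by omega) (by omega) (by omega) hid hle
        (fun d hd hdd hdi => by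
          by_cases hdi' : d < i
          · exact le_trans (hmax d hd hdd hdi') (by omega)
          · omega)
    · rw [if_neg hdvd]
      simp only [dif_neg hdvd] at ih
      exact ih (by omega) he1 (by omega) hed hee
        (fun d hd hdd hdi => by
          by_cases hdi' : d < i
          · exact hmax d hd hdd hdi'
          · have hdi2 : d = i := by omega
            exact absurd ((PySem.Int.mod_eq_zero_iff_dvd n i).mpr (hdi2 ▸ hd)) hdvd)
  | case2 i e hle =>
    intro hi2 he1 hei hed hee hmax
    rw [intSqrtLoopB, dif_neg hle]
    refine ⟨hed, he1, hee, fun d hd hdd => ?_⟩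
    by_cases hdi : d < i
    · exact hmax d hd hdd hdi
    · exfalso
      have h0i : (0:Int) ≤ i := by omega
      have : i * i ≤ d * d := mul_self_le_mul_self h0i (by omega)
      omega

-- A's loop over range(j, 0, -1): with prev the least divisor of n exceeding j
-- (and prev*prev ≥ n), it returns the least divisor d of n with d*d ≥ n.
lemma loopA_spec (n : Int) (hn : 1 ≤ n) :
    ∀ (k : Nat) (j prev : Int), j.toNat = k → 1 ≤ j → j ≤ n →
      prev ∣ n → 1 ≤ prev → n ≤ prev * prev →
      (∀ d, j < d → d ∣ n → prev ≤ d) →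
      (intSqrtLoopA n (PySem.List.pyRange j 0 (-1)) prev ∣ n ∧
       1 ≤ intSqrtLoopA n (PySem.List.pyRange j 0 (-1)) prev ∧
       n ≤ intSqrtLoopA n (PySem.List.pyRange j 0 (-1)) prev *
           intSqrtLoopA n (PySem.List.pyRange j 0 (-1)) prev ∧
       ∀ d, 1 ≤ d → d ∣ n → n ≤ d * d →
         intSqrtLoopA n (PySem.List.pyRange j 0 (-1)) prev ≤ d) := by
  intro k
  induction k using Nat.strong_induction_on with
  | _ k ih =>
    intro j prev hk h1 hjn hpd hp1 hpp hmin
    rw [PySem.List.pyRange_neg_one_cons (by omega)]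
    simp only [intSqrtLoopA, pow_two]
    by_cases hdvd : PySem.Int.mod n j = 0
    · have hjd : j ∣ n := (PySem.Int.mod_eq_zero_iff_dvd n j).mp hdvd
      simp only [if_pos hdvd]
      by_cases h2 : j * j = n
      · simp only [if_pos h2]
        refine ⟨hjd, h1, le_of_eq h2.symm, fun d hd1 hdd hdn => ?_⟩
        by_contra hlt
        have hdj : d < j := by omega
        nlinarith
      · simp only [if_neg h2]
        by_cases h3 : j * j < n
        · simp only [if_pos h3]
          refine ⟨hpd, hp1, hpp, fun d hd1 hdd hdn => ?_⟩
          by_cases hdj : j < d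
          · exact hmin d hdj hdd
          · have hdj2 : d ≤ j := by omega
            nlinarith
        · simp only [if_neg h3]
          have hjj : n ≤ j * j := by omega
          have hj2 : 2 ≤ j := by
            rcases lt_or_ge 1 j with h | h
            · omega
            · exfalso
              have : j = 1 := by omega
              subst this
              omega
          exact ih (j-1).toNat (by omega) (j-1) j (by omega) (by omega) (by omega)
            hjd h1 hjj (fun d hd hdd => by omega)
    · simp only [if_neg hdvd]
      have hj2 : 2 ≤ j := by
        rcases lt_or_ge 1 j with h | h
        · omega
        · exfalso
          have hj1 : j = 1 := by omega
          exact hdvd ((PySem.Int.mod_eq_zero_iff_dvd n j).mpr (hj1 ▸ one_dvd n))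
      refine ih (j-1).toNat (by omega) (j-1) prev (by omega) (by omega) (by omega)
        hpd hp1 hpp (fun d hd hdd => ?_)
      by_cases hdj : j < d
      · exact hmin d hdj hdd
      · have : d = j := by omega
        exact absurd ((PySem.Int.mod_eq_zero_iff_dvd n j).mpr (this ▸ hdd)) hdvd

-- ===== VERDICT (by name: the statement is the Claim_ definition above) =====
theorem int_sqrt_spec : Claim_equal_int_sqrt := by
  intro n _
  unfold Spec_int_sqrt int_sqrt int_sqrt_alt
  rcases le_or_gt n 0 with hn0 | hn1
  · rw [PySem.List.pyRange_neg_one_eq_nil hn0]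
    rw [intSqrtLoopB, dif_neg (by omega)]
    simp [intSqrtLoopA]
  · have hn : 1 ≤ n := hn1
    obtain ⟨hAd, hA1, hAsq, hAmin⟩ :=
      loopA_spec n hn n.toNat n n rfl hn le_rfl dvd_rfl hn (by nlinarith)
        (fun d hd hdd => by omega)
    obtain ⟨hBd, hB1, hBsq, hBmax⟩ :=
      loopB_spec n 2 1 le_rfl le_rfl (by omega) (one_dvd n) (by omega)
        (fun d hd hdd hdi => by omega)
    set rA := intSqrtLoopA n (PySem.List.pyRange n 0 (-1)) n with hrA
    set e := intSqrtLoopB n 2 1 with hre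
    rw [PySem.Int.floordiv_eq_ediv_of_pos (by omega)]
    have hcancel : n / e * e = n := Int.ediv_mul_cancel hBd
    set rB := n / e with hrB
    have hrB1 : 1 ≤ rB := by
      rcases lt_or_ge rB 1 with h | h
      · exfalso; nlinarith
      · exact h
    -- rB is a divisor with rB*rB ≥ n
    have hrBd : rB ∣ n := ⟨e, hcancel.symm⟩
    have heB : e ≤ rB := by nlinarith
    have hrBsq : n ≤ rB * rB := by nlinarith
    -- rA ≤ rB by minimality of rA
    have h1 : rA ≤ rB := hAmin rB hrB1 hrBd hrBsq
    -- e' := n / rA is a divisor with e'*e' ≤ n, so e' ≤ e, hence rB ≤ rA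
    have hcancel' : n / rA * rA = n := Int.ediv_mul_cancel hAd
    set e' := n / rA with hre'
    have he'1 : 1 ≤ e' := by
      rcases lt_or_ge e' 1 with h | h
      · exfalso; nlinarith
      · exact h
    have he'rA : e' ≤ rA := by nlinarith
    have he'sq : e' * e' ≤ n := by nlinarith
    have he'e : e' ≤ e := hBmax e' ⟨rA, hcancel'.symm⟩ he'sq
    have h2 : rB ≤ rA := by nlinarith
    omega
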